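-- pv_equiv track=rewrite | github.com/fortjer/2022-advent-of-code | day7.py | readjust_size_for_subdirs
-- ===== SOURCE A (Python) =====
-- def retrieve_size(dir_sizes, subdirs, curr_dir):
--
--     if curr_dir in subdirs:
--         subdirs_in_curr_dir = subdirs[curr_dir]
--
--         for curr_subdir in subdirs_in_curr_dir:
--
--             path_curr_subdir = curr_dir + curr_subdir + '/'
--
--             dir_sizes[curr_dir] = dir_sizes[curr_dir] + retrieve_size(dir_sizes, subdirs, path_curr_subdir)
--
--     return dir_sizes[curr_dir]
--
-- def readjust_size_for_subdirs(dir_sizes, subdirs, curr_dir):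
--     path_curr_subdir = None
--
--     if curr_dir in subdirs:
--         subdirs_in_curr_dir = subdirs[curr_dir]
--
--         for curr_subdir in subdirs_in_curr_dir:
--
--             path_curr_subdir = curr_dir + curr_subdir + '/'
--
--             dir_sizes[curr_dir] = dir_sizes[curr_dir] + retrieve_size(dir_sizes, subdirs, path_curr_subdir)
--
--     return dir_sizes
-- ===== SOURCE B (Python) =====
-- def readjust_size_for_subdirs(dir_sizes, subdirs, curr_dir):
--     # Iterative explicit-stack post-order traversal instead of recursion.
--     # Mutates dir_sizes in place, exactly like the recursive original.
--     if curr_dir not in subdirs: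
--         return dir_sizes
--     stack = [(curr_dir, list(subdirs[curr_dir]))]
--     while stack:
--         path, pending = stack[-1]
--         if pending:
--             sub = pending.pop(0)
--             child = path + sub + '/'
--             if child in subdirs:
--                 stack.append((child, list(subdirs[child])))
--             else:
--                 dir_sizes[path] = dir_sizes[path] + dir_sizes[child]
--         else:
--             stack.pop()
--             if stack:
--                 parent = stack[-1][0]
--                 dir_sizes[parent] = dir_sizes[parent] + dir_sizes[path]
--     return dir_sizes
-- ===== Notes on version B (the rewrite author's own statement) =====
-- stated objective: alternative
-- what changed: The recursive retrieve_size helper is replaced by an explicit-stack iterative post-order traversal (frames of (path, pending children)) that performs the same in-place additions in the same order, with no recursion and no helper function.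
import Mathlib
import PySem

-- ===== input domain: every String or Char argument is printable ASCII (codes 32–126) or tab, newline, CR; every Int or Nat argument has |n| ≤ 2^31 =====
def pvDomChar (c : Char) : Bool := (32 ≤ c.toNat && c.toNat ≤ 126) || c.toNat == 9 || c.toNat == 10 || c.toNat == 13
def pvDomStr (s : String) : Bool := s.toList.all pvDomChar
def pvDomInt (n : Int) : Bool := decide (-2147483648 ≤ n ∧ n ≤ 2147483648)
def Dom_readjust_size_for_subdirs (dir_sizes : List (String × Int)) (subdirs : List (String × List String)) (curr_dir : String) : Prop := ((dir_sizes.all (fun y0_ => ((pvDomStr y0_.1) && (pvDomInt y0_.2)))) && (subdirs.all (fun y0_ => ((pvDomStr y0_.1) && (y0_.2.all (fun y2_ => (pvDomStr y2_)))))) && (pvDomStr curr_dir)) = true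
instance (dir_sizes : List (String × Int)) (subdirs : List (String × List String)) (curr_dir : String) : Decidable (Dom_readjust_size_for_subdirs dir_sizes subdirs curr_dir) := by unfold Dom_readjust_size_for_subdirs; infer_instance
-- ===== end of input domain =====

-- A aggregates subdirectory sizes into their parents by recursion, mutating the dict in place and returning it;
-- B performs the identical in-place additions with an explicit-stack iterative post-order traversal (no recursion).
-- Both Pythons mutate dir_sizes in place; the equivalence proved here is about the returned mapping.

-- ── termination measures (cited by the ports' decreasing_by; hence above the ports) ──

-- number of subdirs entries whose key is at least as long as p (strictly longer for pvNu)
def pvMu (subs : PySem.Dict String (List String)) (p : String) : Nat :=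
  (subs.items.filter (fun kv => p.length ≤ kv.1.length)).length
def pvNu (subs : PySem.Dict String (List String)) (p : String) : Nat :=
  (subs.items.filter (fun kv => p.length < kv.1.length)).length

theorem pv_filter_mono {α : Type} (l : List α) (q r : α → Bool)
    (h : ∀ x ∈ l, q x = true → r x = true) : (l.filter q).length ≤ (l.filter r).length := by
  induction l with
  | nil => simp
  | cons a t ih =>
    have ht : ∀ x ∈ t, q x = true → r x = true := fun x hx => h x (List.mem_cons_of_mem a hx)
    have ihh := ih ht
    cases hq : q a with
    | false => cases hr : r a <;> simp [hq, hr] <;> omega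
    | true =>
      have hr := h a (List.mem_cons_self) hq
      simp [hq, hr]
      omega

theorem pv_filter_strict {α : Type} (l : List α) (q r : α → Bool)
    (h : ∀ x ∈ l, q x = true → r x = true)
    (x₀ : α) (hx : x₀ ∈ l) (hr : r x₀ = true) (hq : q x₀ = false) :
    (l.filter q).length < (l.filter r).length := by
  induction l with
  | nil => cases hx
  | cons a t ih =>
    have ht : ∀ x ∈ t, q x = true → r x = true := fun x hxx => h x (List.mem_cons_of_mem a hxx)
    rcases List.mem_cons.mp hx with rfl | hx'
    · have := pv_filter_mono t q r ht
      simp [hq, hr]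
      omega
    · have hlt := ih ht hx'
      cases hqa : q a with
      | false => cases hra : r a <;> simp [hqa, hra] <;> omega
      | true =>
        have hra := h a (List.mem_cons_self) hqa
        simp [hqa, hra]
        omega

theorem pv_len_path (p s : String) : (p ++ s ++ "/").length = p.length + s.length + 1 := by
  have h1 : ("/" : String).length = 1 := rfl
  simp [String.length_append, h1]

theorem pvNu_lt_pvMu (subs : PySem.Dict String (List String)) (p : String) (ss : List String)
    (h : subs.get? p = some ss) : pvNu subs p < pvMu subs p := by
  have hmem : (p, ss) ∈ subs.items := PySem.Dict.mem_items_of_get?_eq_some (h := h)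
  exact pv_filter_strict _ _ _ (fun kv _ hkv => by simp_all; omega) (p, ss) hmem
    (by simp) (by simp)

theorem pvMu_le_pvNu (subs : PySem.Dict String (List String)) (p c : String)
    (h : p.length < c.length) : pvMu subs c ≤ pvNu subs p :=
  pv_filter_mono _ _ _ (fun kv _ hkv => by simp_all; omega)

-- total number of listed subdirectory names, and the exponential frame weights for the stack machine
def pvTot (subs : PySem.Dict String (List String)) : Nat :=
  (subs.items.map (fun kv => kv.2.length)).sum
def pvWtB (subs : PySem.Dict String (List String)) (q : String) : Nat :=
  (pvTot subs + 2) ^ (pvMu subs q + 1)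
def pvFrameWt (subs : PySem.Dict String (List String)) (fr : String × List String) : Nat :=
  1 + (fr.2.map (fun s => pvWtB subs (fr.1 ++ s ++ "/"))).sum
def pvStackWt (subs : PySem.Dict String (List String)) (stack : List (String × List String)) : Nat :=
  (stack.map (pvFrameWt subs)).sum

theorem pv_ssc_le_tot (subs : PySem.Dict String (List String)) (c : String) (ss : List String)
    (h : subs.get? c = some ss) : ss.length ≤ pvTot subs := by
  have hmem : (c, ss) ∈ subs.items := PySem.Dict.mem_items_of_get?_eq_some (h := h)
  have : ss.length ∈ subs.items.map (fun kv => kv.2.length) := List.mem_map_of_mem hmem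
  exact List.le_sum_of_mem this

theorem pvWtB_pos (subs : PySem.Dict String (List String)) (q : String) : 0 < pvWtB subs q :=
  Nat.pow_pos (by omega)

-- the push step strictly decreases the total stack weight
theorem pvPush_lt (subs : PySem.Dict String (List String)) (p s : String)
    (pend : List String) (rest : List (String × List String)) (ssc : List String)
    (h : subs.get? (p ++ s ++ "/") = some ssc) :
    pvStackWt subs ((p ++ s ++ "/", ssc) :: (p, pend) :: rest) <
      pvStackWt subs ((p, s :: pend) :: rest) := by
  have hkey : ∀ g ∈ ssc, pvWtB subs ((p ++ s ++ "/") ++ g ++ "/") ≤ (pvTot subs + 2) ^ (pvMu subs (p ++ s ++ "/")) := by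
    intro g _
    have h1 : pvMu subs ((p ++ s ++ "/") ++ g ++ "/") ≤ pvNu subs (p ++ s ++ "/") := by
      apply pvMu_le_pvNu
      have e1 := pv_len_path (p ++ s ++ "/") g
      omega
    have h2 : pvNu subs (p ++ s ++ "/") < pvMu subs (p ++ s ++ "/") := pvNu_lt_pvMu _ _ _ h
    exact Nat.pow_le_pow_right (by omega) (by omega)
  have hsum : (ssc.map (fun g => pvWtB subs ((p ++ s ++ "/") ++ g ++ "/"))).sum ≤
      ssc.length * (pvTot subs + 2) ^ (pvMu subs (p ++ s ++ "/")) := by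
    have := List.sum_le_card_nsmul (ssc.map (fun g => pvWtB subs ((p ++ s ++ "/") ++ g ++ "/")))
      ((pvTot subs + 2) ^ (pvMu subs (p ++ s ++ "/")))
      (by intro x hx
          rcases List.mem_map.mp hx with ⟨g, hg, rfl⟩
          exact hkey g hg)
    simpa [smul_eq_mul] using this
  have hlen : ssc.length ≤ pvTot subs := pv_ssc_le_tot _ _ _ h
  have hpow : 1 ≤ (pvTot subs + 2) ^ (pvMu subs (p ++ s ++ "/")) := Nat.one_le_pow _ _ (by omega)
  have hkeylt : 1 + (ssc.map (fun g => pvWtB subs ((p ++ s ++ "/") ++ g ++ "/"))).sum <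
      pvWtB subs (p ++ s ++ "/") := by
    have : pvWtB subs (p ++ s ++ "/") = (pvTot subs + 2) * (pvTot subs + 2) ^ (pvMu subs (p ++ s ++ "/")) := by
      simp [pvWtB, pow_succ, Nat.mul_comm]
    rw [this]
    nlinarith [hsum, hlen, hpow]
  simp only [pvStackWt, List.map_cons, List.sum_cons, pvFrameWt, List.map_cons, List.sum_cons]
  omega

-- ===== PORT A =====
-- Python dicts become PySem.Dict via ofList; the result is returned as the items list.
-- dir_sizes[k] is read with getD _ k 0; the default 0 is never reached inside Pre_ (KeyError excluded there).
-- retrieve_size returns dir_sizes[curr_dir] after its own mutations, i.e. the post-state value at that key,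
-- so it is ported as the post-state dict, the caller reading the key from it.
mutual
def pvLoopA (subs : PySem.Dict String (List String)) (ss : List String)
    (d : PySem.Dict String Int) (p : String) : PySem.Dict String Int :=
  match ss with
  | [] => d
  | s :: rest =>
    let path := p ++ s ++ "/"
    let v := d.getD p 0                        -- dir_sizes[curr_dir], read before the recursive call
    let d1 := pvRetrieveA subs d path          -- recursive call's mutations
    let d2 := d1.insert p (v + d1.getD path 0) -- dir_sizes[curr_dir] = v + retrieve_size(...)
    pvLoopA subs rest d2 p
  termination_by (pvNu subs p, ss.length)
  decreasing_by
  · apply Prod.Lex.lt_iff.mpr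
    have h1 : pvMu subs (p ++ s ++ "/") ≤ pvNu subs p :=
      pvMu_le_pvNu _ _ _ (by rw [pv_len_path]; omega)
    rcases Nat.lt_or_eq_of_le h1 with h | h
    · exact Or.inl h
    · exact Or.inr ⟨h, by show (0 : Nat) < rest.length + 1; omega⟩
  · apply Prod.Lex.lt_iff.mpr
    exact Or.inr ⟨rfl, by show rest.length < rest.length + 1; omega⟩

def pvRetrieveA (subs : PySem.Dict String (List String))
    (d : PySem.Dict String Int) (p : String) : PySem.Dict String Int :=
  match h : subs.get? p with
  | none => d
  | some ss => pvLoopA subs ss d p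
  termination_by (pvMu subs p, 0)
  decreasing_by
    apply Prod.Lex.lt_iff.mpr; exact Or.inl (pvNu_lt_pvMu _ _ _ h)
end

def readjust_size_for_subdirs (dir_sizes : List (String × Int)) (subdirs : List (String × List String)) (curr_dir : String) : List (String × Int) :=
  (match (PySem.Dict.ofList subdirs).get? curr_dir with
   | none => PySem.Dict.ofList dir_sizes     -- curr_dir not in subdirs: loop skipped
   | some ss => pvLoopA (PySem.Dict.ofList subdirs) ss (PySem.Dict.ofList dir_sizes) curr_dir).items

-- ===== PORT B =====
-- explicit-stack post-order machine: frame = (path, pending children); popping a finished frame adds its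
-- size into the parent frame's entry (no add when the stack empties: the root has no parent).
def pvRunB (subs : PySem.Dict String (List String)) (d : PySem.Dict String Int)
    (stack : List (String × List String)) : PySem.Dict String Int :=
  match stack with
  | [] => d
  | (p, []) :: rest =>                        -- frame finished: pop, add into parent if any
    let d' := match rest with
      | [] => d
      | (q, _) :: _ => d.insert q (d.getD q 0 + d.getD p 0)
    pvRunB subs d' rest
  | (p, s :: pend) :: rest =>                 -- next pending child
    let child := p ++ s ++ "/"
    match h : subs.get? child with
    | none => pvRunB subs (d.insert p (d.getD p 0 + d.getD child 0)) ((p, pend) :: rest)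
    | some ssc => pvRunB subs d ((child, ssc) :: (p, pend) :: rest)
  termination_by pvStackWt subs stack
  decreasing_by
  · simp only [pvStackWt, List.map_cons, List.sum_cons, pvFrameWt, List.map_nil, List.sum_nil]
    omega
  · have := pvWtB_pos subs (p ++ s ++ "/")
    simp only [pvStackWt, List.map_cons, List.sum_cons, pvFrameWt, List.map_cons, List.sum_cons]
    omega
  · exact pvPush_lt subs p s pend rest ssc h

def readjust_size_for_subdirs_alt (dir_sizes : List (String × Int)) (subdirs : List (String × List String)) (curr_dir : String) : List (String × Int) :=
  (match (PySem.Dict.ofList subdirs).get? curr_dir with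
   | none => PySem.Dict.ofList dir_sizes
   | some ss => pvRunB (PySem.Dict.ofList subdirs) (PySem.Dict.ofList dir_sizes) [(curr_dir, ss)]).items

-- ===== PRECONDITION & SPEC =====
-- Pre_ excludes the inputs on which Python A raises KeyError (a traversed path missing from dir_sizes).
-- It is slightly narrower than exact: when curr_dir is a key of subdirs it demands k+sub+'/' ∈ dir_sizes for
-- EVERY subdirs entry, including entries unreachable from curr_dir (on such inputs A still returns normally).
def Pre_readjust_size_for_subdirs (dir_sizes : List (String × Int)) (subdirs : List (String × List String)) (curr_dir : String) : Prop :=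
  ((PySem.Dict.ofList subdirs).get? curr_dir).isSome = true →
    (((PySem.Dict.ofList dir_sizes).get? curr_dir).isSome = true ∧
     ∀ kv ∈ subdirs, ∀ sub ∈ kv.2,
       ((PySem.Dict.ofList dir_sizes).get? (kv.1 ++ sub ++ "/")).isSome = true)
instance (dir_sizes : List (String × Int)) (subdirs : List (String × List String)) (curr_dir : String) : Decidable (Pre_readjust_size_for_subdirs dir_sizes subdirs curr_dir) := by unfold Pre_readjust_size_for_subdirs; infer_instance

def pvWitness_readjust_size_for_subdirs : (List (String × Int)) × (List (String × List String)) × String :=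
  ([("a/", 1), ("a/b/", 2)], [("a/", ["b"])], "a/")

def Spec_readjust_size_for_subdirs (dir_sizes : List (String × Int)) (subdirs : List (String × List String)) (curr_dir : String) (out : List (String × Int)) : Prop := out = readjust_size_for_subdirs_alt dir_sizes subdirs curr_dir
instance (dir_sizes : List (String × Int)) (subdirs : List (String × List String)) (curr_dir : String) (out : List (String × Int)) : Decidable (Spec_readjust_size_for_subdirs dir_sizes subdirs curr_dir out) := by unfold Spec_readjust_size_for_subdirs; infer_instance

-- ===== CLAIM (what is proved, stated in full; the proofs are below) =====
def Claim_equal_readjust_size_for_subdirs : Prop := ∀ (dir_sizes : List (String × Int)) (subdirs : List (String × List String)) (curr_dir : String), Dom_readjust_size_for_subdirs dir_sizes subdirs curr_dir → Pre_readjust_size_for_subdirs dir_sizes subdirs curr_dir → Spec_readjust_size_for_subdirs dir_sizes subdirs curr_dir (readjust_size_for_subdirs dir_sizes subdirs curr_dir)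

-- ===== LEMMAS AND PROOFS =====

-- effect on the dict of popping frame p onto the parent frame (if any)
def pvPopAdd (d : PySem.Dict String Int) (p : String) (stack : List (String × List String)) : PySem.Dict String Int :=
  match stack with
  | [] => d
  | (q, _) :: _ => d.insert q (d.getD q 0 + d.getD p 0)

-- one-step unfolding lemmas for the well-founded definitions
theorem pvLoopA_nil (subs : PySem.Dict String (List String)) (d : PySem.Dict String Int)
    (p : String) : pvLoopA subs [] d p = d := by
  rw [pvLoopA.eq_def]

theorem pvLoopA_cons (subs : PySem.Dict String (List String)) (s : String) (rest : List String)
    (d : PySem.Dict String Int) (p : String) :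
    pvLoopA subs (s :: rest) d p =
      pvLoopA subs rest
        ((pvRetrieveA subs d (p ++ s ++ "/")).insert p
          (d.getD p 0 + (pvRetrieveA subs d (p ++ s ++ "/")).getD (p ++ s ++ "/") 0)) p := by
  rw [pvLoopA.eq_def]

theorem pvRetrieveA_none (subs : PySem.Dict String (List String)) (d : PySem.Dict String Int)
    (p : String) (h : subs.get? p = none) : pvRetrieveA subs d p = d := by
  rw [pvRetrieveA.eq_def]
  split <;> simp_all

theorem pvRetrieveA_some (subs : PySem.Dict String (List String)) (d : PySem.Dict String Int)
    (p : String) (ss : List String) (h : subs.get? p = some ss) :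
    pvRetrieveA subs d p = pvLoopA subs ss d p := by
  rw [pvRetrieveA.eq_def]
  split <;> simp_all

theorem pvRunB_pop (subs : PySem.Dict String (List String)) (d : PySem.Dict String Int)
    (p : String) (rest : List (String × List String)) :
    pvRunB subs d ((p, []) :: rest) = pvRunB subs (pvPopAdd d p rest) rest := by
  rw [pvRunB.eq_def]
  cases rest with
  | nil => rfl
  | cons fr r => rcases fr with ⟨q, qs⟩; rfl

theorem pvRunB_step_none (subs : PySem.Dict String (List String)) (d : PySem.Dict String Int)
    (p s : String) (pend : List String) (rest : List (String × List String))
    (hg : subs.get? (p ++ s ++ "/") = none) :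
    pvRunB subs d ((p, s :: pend) :: rest) =
      pvRunB subs (d.insert p (d.getD p 0 + d.getD (p ++ s ++ "/") 0)) ((p, pend) :: rest) := by
  rw [pvRunB.eq_def]
  split <;> simp_all
  split <;> simp_all

theorem pvRunB_step_some (subs : PySem.Dict String (List String)) (d : PySem.Dict String Int)
    (p s : String) (pend : List String) (rest : List (String × List String)) (ssc : List String)
    (hg : subs.get? (p ++ s ++ "/") = some ssc) :
    pvRunB subs d ((p, s :: pend) :: rest) =
      pvRunB subs d ((p ++ s ++ "/", ssc) :: (p, pend) :: rest) := by
  rw [pvRunB.eq_def]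
  split <;> simp_all
  split <;> simp_all

-- retrieve only writes keys of length ≥ p.length: shorter keys keep their value
theorem pvRetrieveA_preserve (n : Nat) (subs : PySem.Dict String (List String)) :
    ∀ (q : String) (d : PySem.Dict String Int) (k : String),
      pvMu subs q ≤ n → k.length < q.length →
      (pvRetrieveA subs d q).getD k 0 = d.getD k 0 := by
  induction n with
  | zero =>
    intro q d k hn hk
    cases h : subs.get? q with
    | none => rw [pvRetrieveA_none _ _ _ h]
    | some ss => have := pvNu_lt_pvMu _ _ _ h; omega
  | succ n ih =>
    intro q d k hn hk
    cases h : subs.get? q with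
    | none => rw [pvRetrieveA_none _ _ _ h]
    | some ss =>
      have hnu : pvNu subs q < pvMu subs q := pvNu_lt_pvMu _ _ _ h
      rw [pvRetrieveA_some _ _ _ _ h]
      clear h
      induction ss generalizing d with
      | nil => rw [pvLoopA_nil]
      | cons s rest ihs =>
        rw [pvLoopA_cons]
        have hpath : pvMu subs (q ++ s ++ "/") ≤ n := by
          have h1 := pvMu_le_pvNu subs q (q ++ s ++ "/") (by have := pv_len_path q s; omega)
          omega
        have hret := ih (q ++ s ++ "/") d k hpath (by have := pv_len_path q s; omega)
        rw [ihs]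
        rw [PySem.Dict.getD_insert_of_ne (hne := fun hkq => by
          rw [hkq] at hk; omega)]
        exact hret

theorem pv_stackWt_cons (subs : PySem.Dict String (List String))
    (fr : String × List String) (rest : List (String × List String)) :
    pvStackWt subs (fr :: rest) = pvFrameWt subs fr + pvStackWt subs rest := by
  simp [pvStackWt]

theorem pv_frameWt_cons (subs : PySem.Dict String (List String)) (p s : String)
    (pend : List String) :
    pvFrameWt subs (p, s :: pend) = pvWtB subs (p ++ s ++ "/") + pvFrameWt subs (p, pend) := by
  simp [pvFrameWt]; omega

-- machine step: processing one frame equals A's loop over its pending children, then the parent add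
theorem pvRunB_frame (N : Nat) (subs : PySem.Dict String (List String)) :
    ∀ (p : String) (pend : List String) (stack : List (String × List String))
      (d : PySem.Dict String Int), pvStackWt subs ((p, pend) :: stack) ≤ N →
    pvRunB subs d ((p, pend) :: stack) =
      pvRunB subs (pvPopAdd (pvLoopA subs pend d p) p stack) stack := by
  induction N with
  | zero =>
    intro p pend stack d hN
    exfalso
    rw [pv_stackWt_cons] at hN
    simp [pvFrameWt] at hN
  | succ N ih =>
    intro p pend stack d hN
    cases pend with
    | nil => rw [pvRunB_pop, pvLoopA_nil]
    | cons s pend' =>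
      have hwt := pvWtB_pos subs (p ++ s ++ "/")
      cases hg : subs.get? (p ++ s ++ "/") with
      | none =>
        rw [pvRunB_step_none _ _ _ _ _ _ hg]
        have hm : pvStackWt subs ((p, pend') :: stack) ≤ N := by
          rw [pv_stackWt_cons] at hN ⊢
          rw [pv_frameWt_cons] at hN
          omega
        rw [ih _ _ _ _ hm]
        have hloop : pvLoopA subs (s :: pend') d p =
            pvLoopA subs pend' (d.insert p (d.getD p 0 + d.getD (p ++ s ++ "/") 0)) p := by
          rw [pvLoopA_cons]
          rw [pvRetrieveA_none _ _ _ hg]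
        rw [hloop]
      | some ssc =>
        rw [pvRunB_step_some _ _ _ _ _ _ _ hg]
        have hm1 : pvStackWt subs ((p ++ s ++ "/", ssc) :: (p, pend') :: stack) ≤ N := by
          have := pvPush_lt subs p s pend' stack ssc hg
          omega
        rw [ih _ _ _ _ hm1]
        have hm2 : pvStackWt subs ((p, pend') :: stack) ≤ N := by
          rw [pv_stackWt_cons] at hN ⊢
          rw [pv_frameWt_cons] at hN
          omega
        set D := pvLoopA subs ssc d (p ++ s ++ "/") with hD
        have hpop : pvPopAdd D (p ++ s ++ "/") ((p, pend') :: stack) =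
            D.insert p (D.getD p 0 + D.getD (p ++ s ++ "/") 0) := rfl
        rw [hpop, ih _ _ _ _ hm2]
        have hret : pvRetrieveA subs d (p ++ s ++ "/") = D := by
          rw [pvRetrieveA_some _ _ _ _ hg]
        have hpres : D.getD p 0 = d.getD p 0 := by
          rw [← hret]
          exact pvRetrieveA_preserve (pvMu subs (p ++ s ++ "/")) subs (p ++ s ++ "/") d p le_rfl
            (by have := pv_len_path p s; omega)
        have hloop : pvLoopA subs (s :: pend') d p =
            pvLoopA subs pend' (D.insert p (D.getD p 0 + D.getD (p ++ s ++ "/") 0)) p := by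
          rw [pvLoopA_cons, hret, hpres]
        rw [hloop]

-- ===== VERDICT (by name: the statement is the Claim_ definition above) =====
theorem readjust_size_for_subdirs_spec : Claim_equal_readjust_size_for_subdirs := by
  intro dir_sizes subdirs curr_dir _ _
  unfold Spec_readjust_size_for_subdirs readjust_size_for_subdirs readjust_size_for_subdirs_alt
  cases h : (PySem.Dict.ofList subdirs).get? curr_dir with
  | none => rfl
  | some ss =>
    show (pvLoopA (PySem.Dict.ofList subdirs) ss (PySem.Dict.ofList dir_sizes) curr_dir).items =
      (pvRunB (PySem.Dict.ofList subdirs) (PySem.Dict.ofList dir_sizes) [(curr_dir, ss)]).items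
    rw [pvRunB_frame (pvStackWt (PySem.Dict.ofList subdirs) [(curr_dir, ss)]) _ _ _ _ _ le_rfl]
    simp [pvRunB, pvPopAdd]
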